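-- pv_equiv track=rewrite | github.com/daniel-reich/ubiquitous-fiesta | auLEvdvBT5PRnALvn_20.py | mirror_cipher
-- ===== SOURCE A (Python) =====
-- def mirror_cipher(message, key='abcdefghijklmnopqrstuvwxyz'):
--   ciphertext = ''
--   for letter in message.lower():
--     if letter in key:
--       ciphertext += key[len(key) - 1 - key.index(letter)]
--     else:
--       ciphertext += letter
--   return ciphertext
-- ===== SOURCE B (Python) =====
-- def mirror_cipher(message, key='abcdefghijklmnopqrstuvwxyz'):
--   out = list(message.lower())
--   pos = {}
--   for j, c in enumerate(out):
--     pos.setdefault(c, []).append(j)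
--   seen = set()
--   for k, m in zip(key, reversed(key)):
--     if k not in seen:
--       for j in pos.get(k, ()):
--         out[j] = m
--       seen.add(k)
--   return ''.join(out)
-- ===== Notes on version B (the rewrite author's own statement) =====
-- stated objective: alternative
-- what changed: B inverts the traversal: it indexes the lowered message once (char -> list of positions), then walks the key in lockstep with its reverse and scatters each key letter's mirror into those positions, a seen-set skipping duplicate key letters (first occurrence wins); A instead scans the key ('in' + .index) for every message character.
import Mathlib
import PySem

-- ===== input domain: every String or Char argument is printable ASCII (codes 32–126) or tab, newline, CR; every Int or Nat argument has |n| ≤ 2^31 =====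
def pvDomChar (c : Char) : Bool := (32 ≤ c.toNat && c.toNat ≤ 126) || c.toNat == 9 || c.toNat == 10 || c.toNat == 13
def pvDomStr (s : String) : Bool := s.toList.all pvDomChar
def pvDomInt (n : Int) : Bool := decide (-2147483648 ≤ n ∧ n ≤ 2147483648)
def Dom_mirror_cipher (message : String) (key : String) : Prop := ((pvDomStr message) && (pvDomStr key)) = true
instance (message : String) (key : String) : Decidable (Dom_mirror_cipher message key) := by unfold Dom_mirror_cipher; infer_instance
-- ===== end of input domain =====

-- B inverts the traversal: it indexes the lowered message by character once, then walks the
-- key zipped with its reverse, scattering each mirror into the recorded positions (a seen-set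
-- skips duplicate key letters); A scans the key per message character.

-- ===== PORT A =====
-- key[len(key) - 1 - key.index(letter)] as a one-char list (the branch guarantees a hit)
def pvAMirror (kl : List Char) (letter : Char) : List Char :=
  match PySem.List.index? kl letter with
  | some i => (PySem.List.pyGet? kl ((kl.length : Int) - 1 - (i : Int))).elim [] (fun c => [c])
  | none => []

def mirror_cipher (message : String) (key : String) : String :=
  let kl := key.toList
  String.ofList ((PySem.Chars.lower message.toList).foldl
    (fun ct letter =>
      if kl.contains letter then ct ++ pvAMirror kl letter
      else ct ++ [letter]) [])

-- ===== PORT B =====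
-- for j, c in enumerate(out): pos.setdefault(c, []).append(j)
def pvBuildPos (ps : List (Int × Char)) (d : PySem.Dict Char (List Int)) :
    PySem.Dict Char (List Int) :=
  match ps with
  | [] => d
  | (j, c) :: rest => pvBuildPos rest (d.modify c [] (· ++ [j]))

-- for k, m in zip(key, reversed(key)): if k not in seen: (for j in pos.get(k,()): out[j] = m); seen.add(k)
def pvApply (pairs : List (Char × Char)) (pos : PySem.Dict Char (List Int))
    (seen : PySem.Set Char) (out : List Char) : List Char :=
  match pairs with
  | [] => out
  | (k, m) :: rest =>
      if PySem.Set.contains seen k then pvApply rest pos seen out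
      else pvApply rest pos (PySem.Set.add seen k)
        ((pos.getD k []).foldl (fun o j => PySem.List.pySetD o j m) out)

def mirror_cipher_alt (message : String) (key : String) : String :=
  let out := PySem.Chars.lower message.toList
  let pos := pvBuildPos (PySem.List.enumerate out) PySem.Dict.empty
  String.ofList (pvApply (key.toList.zip key.toList.reverse) pos PySem.Set.empty out)

-- ===== PRECONDITION & SPEC =====
def Spec_mirror_cipher (message : String) (key : String) (out : String) : Prop := out = mirror_cipher_alt message key
instance (message : String) (key : String) (out : String) : Decidable (Spec_mirror_cipher message key out) := by unfold Spec_mirror_cipher; infer_instance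

-- ===== CLAIM (what is proved, stated in full; the proofs are below) =====
def Claim_equal_mirror_cipher : Prop := ∀ (message : String) (key : String), Dom_mirror_cipher message key → Spec_mirror_cipher message key (mirror_cipher message key)

-- ===== LEMMAS AND PROOFS =====

-- the value both programs give a single (lowered) character, phrased via the zipped pair list
def pvSpec (full : List (Char × Char)) (c : Char) : Char :=
  match full.find? (fun p => p.1 == c) with
  | some p => p.2
  | none => c

-- pos characterization: the grouping loop collects, per character, its positions in order
theorem pvBuildPos_getD (ps : List (Int × Char)) (d : PySem.Dict Char (List Int)) (c : Char) :
    (pvBuildPos ps d).getD c [] =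
      d.getD c [] ++ (ps.filter (fun p => p.2 == c)).map Prod.fst := by
  induction ps generalizing d with
  | nil => simp [pvBuildPos]
  | cons p rest ih =>
    obtain ⟨j, x⟩ := p
    simp only [pvBuildPos]
    rw [ih, PySem.Dict.getD_modify]
    by_cases h : x = c
    · subst h; simp
    · simp [h, Ne.symm h]

theorem pvPos_mem (L : List Char) (c : Char) (n : Nat) (hn : n < L.length) :
    ((n : Int) ∈ (pvBuildPos (PySem.List.enumerate L) PySem.Dict.empty).getD c []) ↔ L[n] = c := by
  rw [pvBuildPos_getD, PySem.Dict.getD_empty, List.nil_append]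
  simp only [List.mem_map, List.mem_filter]
  constructor
  · rintro ⟨p, ⟨hmem, hx⟩, hj⟩
    obtain ⟨k, hk, rfl⟩ := (PySem.List.mem_enumerate_iff _ _ _).mp hmem
    simp only at hx hj
    have hkn : k = n := by omega
    subst hkn
    simpa using hx
  · intro hc
    refine ⟨((n : Int), L[n]), ⟨?_, by simpa using hc⟩, rfl⟩
    exact (PySem.List.mem_enumerate_iff _ _ _).mpr ⟨n, hn, by simp⟩

theorem pvPos_nonneg (L : List Char) (c : Char) (j : Int)
    (hj : j ∈ (pvBuildPos (PySem.List.enumerate L) PySem.Dict.empty).getD c []) : 0 ≤ j := by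
  rw [pvBuildPos_getD, PySem.Dict.getD_empty, List.nil_append] at hj
  simp only [List.mem_map, List.mem_filter] at hj
  obtain ⟨p, ⟨hmem, -⟩, hj⟩ := hj
  obtain ⟨k, hk, hpk⟩ := (PySem.List.mem_enumerate_iff _ _ _).mp hmem
  subst hpk; simp at hj; omega

-- scatter: writing m at each listed position, elementwise (getElem? form)
theorem pvScatter_length (js : List Int) (m : Char) (o : List Char) :
    (js.foldl (fun o j => PySem.List.pySetD o j m) o).length = o.length := by
  induction js generalizing o with
  | nil => rfl
  | cons j rest ih => simp [ih, PySem.List.length_pySetD]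

theorem pvScatter_getElem? (js : List Int) (m : Char) (o : List Char)
    (hnn : ∀ j ∈ js, 0 ≤ j) (n : Nat) :
    (js.foldl (fun o j => PySem.List.pySetD o j m) o)[n]? =
      if (n : Int) ∈ js ∧ n < o.length then some m else o[n]? := by
  induction js generalizing o with
  | nil => simp
  | cons j rest ih =>
    have hj0 : 0 ≤ j := hnn j (by simp)
    have hset : PySem.List.pySetD o j m = o.set j.toNat m :=
      PySem.List.pySetD_of_nonneg _ _ hj0
    simp only [List.foldl_cons]
    rw [ih _ (fun x hx => hnn x (List.mem_cons_of_mem _ hx)), hset]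
    rw [List.getElem?_set, List.length_set]
    by_cases h1 : (n : Int) ∈ rest ∧ n < o.length
    · simp [h1, List.mem_cons]
    · rw [if_neg h1]
      by_cases h2 : j.toNat = n
      · have hji : (n : Int) = j := by omega
        by_cases h3 : n < o.length
        · simp [h2, h3, hji, List.mem_cons]
        · have : o[n]? = none := List.getElem?_eq_none (by omega)
          simp [h2, h3]
      · have hji : ¬((n : Int) = j) := by omega
        rw [if_neg h2, if_neg ?hc]
        case hc =>
          rintro ⟨hmem, hlen⟩
          rcases List.mem_cons.mp hmem with h | h
          · exact hji h
          · exact h1 ⟨h, hlen⟩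

theorem pvApply_length (pairs : List (Char × Char)) (pos : PySem.Dict Char (List Int))
    (seen : PySem.Set Char) (out : List Char) :
    (pvApply pairs pos seen out).length = out.length := by
  induction pairs generalizing seen out with
  | nil => rfl
  | cons p rest ih =>
    obtain ⟨k, m⟩ := p
    simp only [pvApply]
    split
    · exact ih seen out
    · rw [ih]; exact pvScatter_length ..

-- the main invariant induction for B's key-major loop (getElem? form)
theorem pvApply_getElem? (L : List Char) (full : List (Char × Char)) :
    ∀ (rest : List (Char × Char)) (seen : PySem.Set Char) (out : List Char),
      out.length = L.length →
      (∀ n (hn : n < L.length),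
        out[n]? = some (if PySem.Set.contains seen L[n] then pvSpec full L[n] else L[n])) →
      (∀ c, PySem.Set.contains seen c = false →
        rest.find? (fun p => p.1 == c) = full.find? (fun p => p.1 == c)) →
      ∀ n (hn : n < L.length),
        (pvApply rest (pvBuildPos (PySem.List.enumerate L) PySem.Dict.empty) seen out)[n]? =
          some (pvSpec full L[n]) := by
  intro rest
  induction rest with
  | nil =>
    intro seen out hlen hout hfind n hn
    simp only [pvApply]
    rw [hout n hn]
    by_cases hc : PySem.Set.contains seen L[n] = true
    · rw [if_pos hc]
    · rw [if_neg hc]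
      have := hfind L[n] (by simpa using hc)
      simp only [List.find?_nil] at this
      simp [pvSpec, ← this]
  | cons p rest ih =>
    obtain ⟨k, m⟩ := p
    intro seen out hlen hout hfind n hn
    simp only [pvApply]
    by_cases hk : PySem.Set.contains seen k = true
    · rw [if_pos hk]
      refine ih seen out hlen hout ?_ n hn
      intro c hc
      have hck : ¬(k = c) := fun h => by rw [h] at hk; rw [hk] at hc; exact Bool.true_eq_false.mp hc
      rw [← hfind c hc, List.find?_cons_of_neg (by simp [hck])]
    · rw [if_neg hk]
      set pos := pvBuildPos (PySem.List.enumerate L) PySem.Dict.empty with hpos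
      have hm : pvSpec full k = m := by
        have := hfind k (by simpa using hk)
        rw [List.find?_cons_of_pos (by simp)] at this
        simp [pvSpec, ← this]
      have hlen' : ((pos.getD k []).foldl (fun o j => PySem.List.pySetD o j m) out).length
          = L.length := by rw [pvScatter_length, hlen]
      refine ih (PySem.Set.add seen k) _ hlen' ?_ ?_ n hn
      · intro n' hn'
        rw [pvScatter_getElem? _ _ _ (fun j hj => pvPos_nonneg L k j hj) n']
        by_cases hLk : L[n'] = k
        · have hmemseen : PySem.Set.contains (PySem.Set.add seen k) L[n'] = true := by
            rw [PySem.Set.contains_iff]; exact (PySem.Set.mem_add ..).mpr (Or.inr hLk)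
          rw [if_pos ⟨(pvPos_mem L k n' hn').mpr hLk, by omega⟩, hmemseen, if_pos rfl, hLk, hm]
        · rw [if_neg (fun h => hLk ((pvPos_mem L k n' hn').mp h.1))]
          have hcontains : PySem.Set.contains (PySem.Set.add seen k) L[n']
              = PySem.Set.contains seen L[n'] := by
            by_cases hs : PySem.Set.contains seen L[n'] = true
            · rw [hs, PySem.Set.contains_iff]
              exact (PySem.Set.mem_add ..).mpr (Or.inl ((PySem.Set.contains_iff _ _).mp hs))
            · rw [Bool.not_eq_true] at hs
              rw [hs, ← Bool.not_eq_true]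
              intro hmem
              rcases (PySem.Set.mem_add ..).mp ((PySem.Set.contains_iff _ _).mp hmem) with h | h
              · rw [(PySem.Set.contains_iff _ _).mpr h] at hs; exact Bool.true_eq_false.mp hs
              · exact hLk h
          rw [hcontains]
          exact hout n' hn'
      · intro c hc
        have hck : ¬(k = c) := by
          intro h; subst h
          rw [← Bool.not_eq_true] at hc
          exact hc ((PySem.Set.contains_iff _ _).mpr ((PySem.Set.mem_add ..).mpr (Or.inr rfl)))
        have hcseen : PySem.Set.contains seen c = false := by
          rw [← Bool.not_eq_true]
          intro hmem
          rw [← Bool.not_eq_true] at hc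
          exact hc ((PySem.Set.contains_iff _ _).mpr ((PySem.Set.mem_add ..).mpr
            (Or.inl ((PySem.Set.contains_iff _ _).mp hmem))))
        rw [← hfind c hcseen, List.find?_cons_of_neg (by simp [hck])]

-- A's find?-on-zip characterization (via the first index of the letter in the key)
theorem pvFind?_zip (c : Char) (l : List Char) :
    ∀ (r : List Char), l.length ≤ r.length →
      (l.zip r).find? (fun p => p.1 == c) =
        (List.idxOf? c l).bind (fun i => (r[i]?).map (fun m => (c, m))) := by
  induction l with
  | nil => intro r _; simp
  | cons x xs ih =>
    intro r hr
    cases r with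
    | nil => simp at hr
    | cons y ys =>
      by_cases h : x = c
      · subst h
        rw [List.zip_cons_cons, List.find?_cons_of_pos (by simp)]
        simp [List.idxOf?_cons]
      · rw [List.zip_cons_cons, List.find?_cons_of_neg (by simp [h]),
          ih ys (by simpa using hr)]
        have : List.idxOf? c (x :: xs) = (List.idxOf? c xs).map (· + 1) := by
          simp [List.idxOf?_cons, h]
        rw [this]
        cases List.idxOf? c xs <;> simp

-- A's per-character branch equals pvSpec of the zipped pair list
theorem pvChar_agree (kl : List Char) (c : Char) :
    (if kl.contains c then pvAMirror kl c else [c]) = [pvSpec (kl.zip kl.reverse) c] := by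
  unfold pvSpec
  rw [pvFind?_zip c kl kl.reverse (by simp)]
  by_cases hmem : c ∈ kl
  · obtain ⟨i, hi⟩ :=
      Option.isSome_iff_exists.mp ((PySem.List.index?_isSome_iff kl c).mpr hmem)
    obtain ⟨hik, hget, -⟩ := PySem.List.getElem_of_index?_eq_some hi
    have hidx : List.idxOf? c kl = some i := by simpa using hi
    have hlt : kl.length - 1 - i < kl.length := by omega
    have hrev : kl.reverse[i]? = some (kl[kl.length - 1 - i]'hlt) := by
      rw [List.getElem?_eq_getElem (by simpa using hik)]
      exact congrArg some (List.getElem_reverse ..)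
    have hpy : PySem.List.pyGet? kl ((kl.length : Int) - 1 - (i : Int)) =
        some (kl[kl.length - 1 - i]'hlt) := by
      rw [show (kl.length : Int) - 1 - (i : Int) = ((kl.length - 1 - i : Nat) : Int) by omega,
        PySem.List.pyGet?_natCast]
      simp [List.getElem?_eq_getElem hlt]
    simp [hidx, hrev, pvAMirror, hpy, hmem]
  · have hidx : List.idxOf? c kl = none := by
      simpa using (PySem.List.index?_eq_none_iff kl c).mpr hmem
    simp [hidx, hmem]

-- ===== VERDICT (by name: the statement is the Claim_ definition above) =====
theorem mirror_cipher_spec : Claim_equal_mirror_cipher := by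
  intro message key _
  unfold Spec_mirror_cipher mirror_cipher mirror_cipher_alt
  simp only []
  congr 1
  set L := PySem.Chars.lower message.toList with hL
  set full := key.toList.zip key.toList.reverse with hfull
  -- A's loop is a flatMap of per-character singletons, i.e. L.map (pvSpec full)
  have hA : L.foldl
      (fun ct letter =>
        if key.toList.contains letter then ct ++ pvAMirror key.toList letter
        else ct ++ [letter]) [] = L.map (pvSpec full) := by
    rw [show (fun ct letter =>
          if key.toList.contains letter then ct ++ pvAMirror key.toList letter
          else ct ++ [letter]) =
        (fun ct letter => ct ++
          (if key.toList.contains letter then pvAMirror key.toList letter else [letter])) from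
      funext fun ct => funext fun letter => by split_ifs <;> rfl]
    rw [PySem.List.foldl_append_eq_flatMap, List.nil_append]
    induction L with
    | nil => rfl
    | cons x xs ih => rw [List.flatMap_cons, List.map_cons, pvChar_agree, ih]; rfl
  rw [hA]
  -- B's key-major loop produces the same list, proved via getElem?
  apply List.ext_getElem?
  intro n
  by_cases hn : n < L.length
  · rw [pvApply_getElem? L full full PySem.Set.empty L rfl
        (fun n' hn' => by
          rw [List.getElem?_eq_getElem hn']
          have : PySem.Set.contains PySem.Set.empty L[n'] = false := rfl
          rw [this, if_neg (by simp)])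
        (fun c _ => rfl) n hn]
    rw [List.getElem?_eq_getElem (by simpa using hn), List.getElem_map]
  · have h1 : (L.map (pvSpec full))[n]? = none := List.getElem?_eq_none (by simpa using hn)
    have h2 : (pvApply full (pvBuildPos (PySem.List.enumerate L) PySem.Dict.empty)
        PySem.Set.empty L)[n]? = none :=
      List.getElem?_eq_none (by rw [pvApply_length]; omega)
    rw [h1, h2]
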